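-- pv_equiv track=rewrite | github.com/edcuth/hacker-rank | python/algorithm practice/Gemstones.py | gemstones
-- ===== SOURCE A (Python) =====
-- from collections import Counter
--
-- def gemstones(arr):
--     b = []
--     for i in range(len(arr)):
--         arr[i] = list(set(arr[i]))
--     for x in arr:
--         for z in x:
--             b.append(z)
--     a = Counter(b)
--     count = 0
--     for x in a.values():
--         if x == len(arr):
--             count += 1
--     return count
-- ===== SOURCE B (Python) =====
-- def gemstones(arr):
--     for i in range(len(arr)):
--         arr[i] = list(set(arr[i]))
--     if not arr:
--         return 0
--     common = set(arr[0])
--     for x in arr[1:]: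
--         common &= set(x)
--     return len(common)
-- ===== Notes on version B (the rewrite author's own statement) =====
-- stated objective: idiomatic
-- what changed: Replaces flattening all deduplicated characters into a Counter and counting frequencies equal to len(arr) by maintaining a single shrinking set intersection over the strings; the observable in-place dedup of arr is preserved.
import Mathlib
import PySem

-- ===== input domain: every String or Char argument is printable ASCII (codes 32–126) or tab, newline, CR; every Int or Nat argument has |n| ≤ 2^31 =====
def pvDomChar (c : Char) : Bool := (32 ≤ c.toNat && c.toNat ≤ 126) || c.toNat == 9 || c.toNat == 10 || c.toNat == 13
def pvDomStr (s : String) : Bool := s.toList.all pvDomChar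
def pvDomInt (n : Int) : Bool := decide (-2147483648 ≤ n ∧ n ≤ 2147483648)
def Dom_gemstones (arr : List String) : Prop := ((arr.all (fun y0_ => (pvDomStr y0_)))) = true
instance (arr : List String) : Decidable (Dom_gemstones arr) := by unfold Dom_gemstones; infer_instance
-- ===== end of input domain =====

-- B replaces A's Counter over all flattened deduplicated characters by a single shrinking
-- set intersection (idiomatic); equivalence is about the RETURN value — both Pythons perform
-- the same observable in-place dedup of arr (arr[i] = list(set(arr[i]))), modelled here purely.

-- ===== PORT A =====
-- 'for i in range(len(arr)): arr[i] = list(set(arr[i]))' : each entry replaced by its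
-- deduplicated character list (set iteration order is not modelled; every later use of these
-- lists is order-independent — counts and lengths only).
def gemstones (arr : List String) : Int :=
  let arr2 : List (List Char) := arr.map (fun s => PySem.Set.ofList s.toList)
  let b : List Char := arr2.foldl (fun acc x => x.foldl (fun a z => a ++ [z]) acc) []
  let a : PySem.Dict Char Int := PySem.Dict.counter b
  a.values.foldl (fun count x => if x = (arr.length : Int) then count + 1 else count) 0

-- ===== PORT B =====
def gemstones_alt (arr : List String) : Int :=
  let arr2 : List (List Char) := arr.map (fun s => PySem.Set.ofList s.toList)
  match arr2 with
  | [] => 0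
  | h :: t =>
    ((t.foldl (fun common x => PySem.Set.inter common (PySem.Set.ofList x))
        (PySem.Set.ofList h)).length : Int)

-- ===== PRECONDITION & SPEC =====
def Spec_gemstones (arr : List String) (out : Int) : Prop := out = gemstones_alt arr
instance (arr : List String) (out : Int) : Decidable (Spec_gemstones arr out) := by unfold Spec_gemstones; infer_instance

-- ===== CLAIM (what is proved, stated in full; the proofs are below) =====
def Claim_equal_gemstones : Prop := ∀ (arr : List String), Dom_gemstones arr → Spec_gemstones arr (gemstones arr)

-- ===== LEMMAS AND PROOFS =====

-- count of a character in a flatten of duplicate-free lists = number of lists containing it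
theorem pv_count_flatten (L : List (List Char)) (hnd : ∀ l ∈ L, l.Nodup) (c : Char) :
    L.flatten.count c = L.countP (fun l => decide (c ∈ l)) := by
  induction L with
  | nil => simp
  | cons h t ih =>
    simp only [List.flatten_cons, List.count_append, List.countP_cons]
    rw [ih (fun l hl => hnd l (List.mem_cons_of_mem _ hl))]
    have hh : h.Nodup := hnd h (List.mem_cons_self)
    by_cases hc : c ∈ h
    · simp [hc, List.count_eq_one_of_mem hh hc]; omega
    · simp [hc, List.count_eq_zero_of_not_mem hc]

-- the B-side fold of intersections: membership characterisation and nodup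
theorem pv_foldl_inter_mem (t : List (List Char)) (s : PySem.Set Char) (c : Char) :
    c ∈ t.foldl (fun common x => PySem.Set.inter common (PySem.Set.ofList x)) s ↔
      c ∈ s ∧ ∀ l ∈ t, c ∈ l := by
  induction t generalizing s with
  | nil => simp
  | cons h t ih =>
    simp only [List.foldl_cons, ih, PySem.Set.mem_inter, PySem.Set.mem_ofList,
      List.mem_cons]
    constructor
    · rintro ⟨⟨hs, hh⟩, hall⟩
      exact ⟨hs, fun l hl => hl.elim (fun e => e ▸ hh) (hall l)⟩
    · rintro ⟨hs, hall⟩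
      exact ⟨⟨hs, hall h (Or.inl rfl)⟩, fun l hl => hall l (Or.inr hl)⟩

theorem pv_foldl_inter_nodup (t : List (List Char)) (s : PySem.Set Char) (hs : s.Nodup) :
    (t.foldl (fun common x => PySem.Set.inter common (PySem.Set.ofList x)) s).Nodup := by
  induction t generalizing s with
  | nil => exact hs
  | cons h t ih => exact ih _ (PySem.Set.nodup_inter _ _ hs)

-- ===== VERDICT (by name: the statement is the Claim_ definition above) =====
theorem gemstones_spec : Claim_equal_gemstones := by
  intro arr _
  unfold Spec_gemstones gemstones gemstones_alt
  cases arr with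
  | nil => decide
  | cons s rest =>
    simp only [List.map_cons]
    set h : List Char := PySem.Set.ofList s.toList with hh
    set t : List (List Char) := rest.map (fun s => PySem.Set.ofList s.toList) with ht
    -- A side: flatten, counter, count of values equal to length
    rw [show (fun (acc : List Char) (x : List Char) =>
          x.foldl (fun a z => a ++ [z]) acc) = (fun acc x => acc ++ x) from
        funext fun acc => funext fun x => PySem.List.foldl_append_singleton x acc]
    rw [PySem.List.foldl_append_eq_flatten, List.nil_append]
    have hvals : (PySem.Dict.counter ((h :: t).flatten)).values =
        (PySem.Set.ofList ((h :: t).flatten)).map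
          (fun k => ((((h :: t).flatten).count k : Nat) : Int)) := by
      show (PySem.Dict.counter ((h :: t).flatten)).items.map (·.2) = _
      rw [PySem.Dict.items_counter]
      simp [List.map_map, Function.comp]
    rw [hvals, List.foldl_map]
    have hfix : (fun (x : Int) (y : Char) =>
        if ((((h :: t).flatten).count y : Nat) : Int) = ((s :: rest).length : Int)
        then x + 1 else x) =
        (fun (acc : Int) (y : Char) =>
          if (fun c => decide (((((h :: t).flatten).count c : Nat) : Int) =
              ((s :: rest).length : Int))) y = true then acc + 1 else acc) := by
      funext acc y; simp
    rw [hfix, PySem.List.foldl_count_if]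
    simp only [zero_add]
    -- characterise the predicate: count = length ↔ in every list
    have hnd : ∀ l ∈ h :: t, l.Nodup := by
      intro l hl
      rcases List.mem_cons.mp hl with e | hl
      · exact e ▸ PySem.Set.nodup_ofList s.toList
      · rcases List.mem_map.mp (ht ▸ hl) with ⟨u, _, e⟩
        exact e ▸ PySem.Set.nodup_ofList u.toList
    have hlen : (h :: t).length = (s :: rest).length := by
      simp [ht]
    have hpred : ∀ c : Char,
        (decide (((((h :: t).flatten).count c : Nat) : Int) = ((s :: rest).length : Int))) =
          decide (∀ l ∈ h :: t, c ∈ l) := by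
      intro c
      have h1 : ((h :: t).flatten).count c = (h :: t).countP (fun l => decide (c ∈ l)) :=
        pv_count_flatten _ hnd c
      have h2 : (((h :: t).flatten).count c = (s :: rest).length) ↔ ∀ l ∈ h :: t, c ∈ l := by
        rw [h1, ← hlen]
        constructor
        · intro he l hl
          exact of_decide_eq_true (List.countP_eq_length.mp he l hl)
        · intro hall
          exact List.countP_eq_length.mpr (fun l hl => decide_eq_true (hall l hl))
      simp only [decide_eq_decide]
      rw [← h2]
      exact Int.natCast_inj
    -- rewrite the countP predicate
    rw [List.countP_congr (fun c _ => by rw [hpred c])]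
    -- B side: the fold of intersections as a filtered list
    have hB := pv_foldl_inter_mem t (PySem.Set.ofList h)
    have hBnd := pv_foldl_inter_nodup t (PySem.Set.ofList h) (PySem.Set.nodup_ofList h)
    -- A's filtered set and B's fold result have the same members and are both Nodup
    have hperm :
        ((PySem.Set.ofList ((h :: t).flatten)).filter (fun c => decide (∀ l ∈ h :: t, c ∈ l))).Perm
          (t.foldl (fun common x => PySem.Set.inter common (PySem.Set.ofList x))
            (PySem.Set.ofList h)) := by
      rw [List.perm_ext_iff_of_nodup
        (List.Nodup.filter _ (PySem.Set.nodup_ofList _)) hBnd]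
      intro c
      rw [List.mem_filter, hB c, PySem.Set.mem_ofList, PySem.Set.mem_ofList]
      constructor
      · rintro ⟨_, hall⟩
        have hall' := of_decide_eq_true hall
        exact ⟨hall' h List.mem_cons_self, fun l hl => hall' l (List.mem_cons_of_mem _ hl)⟩
      · rintro ⟨hch, hall⟩
        refine ⟨List.mem_flatten.mpr ⟨h, List.mem_cons_self, hch⟩, decide_eq_true ?_⟩
        intro l hl
        rcases List.mem_cons.mp hl with e | hl
        · exact e ▸ hch
        · exact hall l hl
    rw [List.countP_eq_length_filter, hperm.length_eq]
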